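-- pv_equiv track=rewrite | github.com/SmallPigPeppa/pl-seg | segmentation/model_vit_flex.py | find_optimal_patch_and_size
-- ===== SOURCE A (Python) =====
-- import math
--
-- def find_optimal_patch_and_size(image_size, depth, min_patches=12, max_patches=16):
--     """
--     根据输入的图像尺寸、深度和patch数量范围，找到最优的 patch size 和调整后的 image size。
--
--     参数:
--     image_size (tuple): 输入的图像宽高 (width, height)
--     depth (int): 深度，patch size 必须是 2^depth 的整数倍
--     min_patches (int): 分割后的最小块数
--     max_patches (int): 分割后的最大块数
--
--     返回:
--     tuple: 最优的 patch size 和调整后的 image size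
--     """
--     base = 2 ** depth
--     best_patch_sizes = []
--     best_adjusted_sizes = []
--     best_num_patches = []
--
--     for dimension in image_size:
--         best_patch_diff = float('inf')
--         best_patch_size = None
--         best_adjusted_size = None
--         best_patch_count = None
--
--         # 遍历可能的patch size
--         for patch_size in range(base, dimension + 1, base):
--             num_patches = math.ceil(dimension / patch_size)
--             if min_patches <= num_patches <= max_patches:
--                 adjusted_size = patch_size * num_patches
--                 patch_diff = abs(dimension - adjusted_size)
--
--                 # 寻找变化最小的调整后尺寸
--                 if patch_diff < best_patch_diff:
--                     best_patch_diff = patch_diff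
--                     best_patch_size = patch_size
--                     best_adjusted_size = adjusted_size
--                     best_patch_count = num_patches
--
--         best_patch_sizes.append(best_patch_size)
--         best_adjusted_sizes.append(best_adjusted_size)
--         best_num_patches.append(best_patch_count)
--
--     return best_patch_sizes, best_adjusted_sizes, best_num_patches
-- ===== SOURCE B (Python) =====
-- def find_optimal_patch_and_size(image_size, depth, min_patches=12, max_patches=16):
--     """Per dimension, build the (few) candidate tuples keyed by patch COUNT n in
--     [min_patches, max_patches] and select the best with a single min() over
--     (diff, -n, ...) — ties on diff go to the largest n, i.e. the smallest patch size,
--     matching A; instead of A's scan over every multiple of 2**depth up to the dimension."""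
--     base = 2 ** depth
--
--     def best_for(dimension):
--         cands = []
--         if base <= dimension:
--             hi = min(max_patches, -(-dimension // base))
--             for n in range(max(min_patches, 1), hi + 1):
--                 ps = base * -(-dimension // (base * n))  # least multiple of base covering with n patches
--                 if ps <= dimension and ps * (n - 1) < dimension:  # ps fits and n == ceil(dimension/ps)
--                     cands.append((ps * n - dimension, -n, ps, n))
--         if not cands:
--             return (None, None, None)
--         _, _, ps, n = min(cands)
--         return (ps, ps * n, n)
--
--     triples = [best_for(d) for d in image_size]
--     return [t[0] for t in triples], [t[1] for t in triples], [t[2] for t in triples]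
-- ===== Notes on version B (the rewrite author's own statement) =====
-- stated objective: alternative
-- what changed: Instead of scanning every multiple of 2**depth up to the dimension and updating a running best, B builds the small candidate list keyed by the patch count n in [max(min_patches,1), min(max_patches, ceil(dimension/2**depth))] (computing for each n the least multiple of 2**depth that covers the dimension) and selects the answer with one min() over (diff, -n) tuples, which reproduces A's smallest-patch tie-break; the three result lists are produced by mapping over the per-dimension triples.
import Mathlib
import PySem

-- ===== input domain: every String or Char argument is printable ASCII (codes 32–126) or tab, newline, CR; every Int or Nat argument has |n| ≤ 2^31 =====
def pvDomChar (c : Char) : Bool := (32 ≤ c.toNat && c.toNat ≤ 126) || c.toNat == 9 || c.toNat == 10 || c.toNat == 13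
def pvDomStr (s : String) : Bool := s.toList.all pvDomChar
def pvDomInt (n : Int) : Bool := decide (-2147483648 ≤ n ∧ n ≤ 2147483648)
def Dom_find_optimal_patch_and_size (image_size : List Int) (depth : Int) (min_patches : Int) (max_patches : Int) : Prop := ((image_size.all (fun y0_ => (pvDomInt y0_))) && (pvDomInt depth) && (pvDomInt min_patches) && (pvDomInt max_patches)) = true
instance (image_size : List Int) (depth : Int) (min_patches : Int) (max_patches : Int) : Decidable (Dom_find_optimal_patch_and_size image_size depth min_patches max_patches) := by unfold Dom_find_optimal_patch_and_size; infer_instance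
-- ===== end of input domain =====

-- B replaces A's scan over every multiple of 2**depth per dimension by building the few
-- candidates keyed by the patch COUNT and selecting with one min(); equivalence of return
-- values is proved.

-- math.ceil(d / ps): exact ceiling division; exact for Python's float division on Dom
-- (|d|, |ps| ≤ 2^31, so d/ps rounds to a value with the true ceiling).
def pvCdiv (a b : Int) : Int := -(PySem.Int.floordiv (-a) b)

-- ===== PORT A =====
def pvStepA (d minP maxP : Int) (st : Option Int × Option Int × Option Int × Option Int)
    (ps : Int) : Option Int × Option Int × Option Int × Option Int :=
  let n := pvCdiv d ps
  if minP ≤ n ∧ n ≤ maxP then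
    let adj := ps * n
    let diff := |d - adj|
    match st.1 with
    | none => (some diff, some ps, some adj, some n)      -- diff < inf
    | some bd => if diff < bd then (some diff, some ps, some adj, some n) else st
  else st

def pvDimA (d b minP maxP : Int) : Option Int × Option Int × Option Int × Option Int :=
  (PySem.List.pyRange b (d + 1) b).foldl (pvStepA d minP maxP) (none, none, none, none)

def find_optimal_patch_and_size (image_size : List Int) (depth : Int) (min_patches : Int) (max_patches : Int) : List (List (Option Int)) :=
  let base : Int := 2 ^ depth.toNat
  let r := image_size.foldl
    (fun (acc : List (Option Int) × List (Option Int) × List (Option Int)) d =>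
      let res := pvDimA d base min_patches max_patches
      (acc.1 ++ [res.2.1], acc.2.1 ++ [res.2.2.1], acc.2.2 ++ [res.2.2.2]))
    ([], [], [])
  [r.1, r.2.1, r.2.2]

-- ===== PORT B =====
-- least multiple of base whose n patches cover the dimension
def pvPs (d b n : Int) : Int := b * pvCdiv d (b * n)

-- Python's lexicographic `<` on the 4-tuples compared by min()
def pvTupLt (x y : Int × Int × Int × Int) : Bool :=
  x.1 < y.1 || (x.1 == y.1 && (x.2.1 < y.2.1 || (x.2.1 == y.2.1 &&
    (x.2.2.1 < y.2.2.1 || (x.2.2.1 == y.2.2.1 && x.2.2.2 < y.2.2.2)))))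

-- the candidate list (diff, -n, ps, n) built by the `for n in range(...)` loop
def pvCands (d b minP maxP : Int) : List (Int × Int × Int × Int) :=
  if b ≤ d then
    (PySem.List.pyRange (max minP 1) (min maxP (pvCdiv d b) + 1) 1).filterMap
      (fun n =>
        if pvPs d b n ≤ d ∧ pvPs d b n * (n - 1) < d then
          some (pvPs d b n * n - d, -n, pvPs d b n, n)
        else none)
  else []

-- best_for: min() over the candidates (first minimum kept, as in Python's min)
def pvBestFor (d b minP maxP : Int) : Option Int × Option Int × Option Int :=
  match pvCands d b minP maxP with
  | [] => (none, none, none)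
  | c :: rest =>
    let m := rest.foldl (fun m x => if pvTupLt x m then x else m) c
    (some m.2.2.1, some (m.2.2.1 * m.2.2.2), some m.2.2.2)

def find_optimal_patch_and_size_alt (image_size : List Int) (depth : Int) (min_patches : Int) (max_patches : Int) : List (List (Option Int)) :=
  let base : Int := 2 ^ depth.toNat
  let triples := image_size.map (fun d => pvBestFor d base min_patches max_patches)
  [triples.map (fun t => t.1), triples.map (fun t => t.2.1), triples.map (fun t => t.2.2)]

-- ===== PRECONDITION & SPEC =====
-- Pre_ excludes only depth < 0 with a nonempty image_size: there Python's 2 ** depth is a float and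
-- range(float, …) raises TypeError at the first dimension (with no dimensions A returns ([], [], [])).
def Pre_find_optimal_patch_and_size (image_size : List Int) (depth : Int) (min_patches : Int) (max_patches : Int) : Prop := image_size = [] ∨ 0 ≤ depth
instance (image_size : List Int) (depth : Int) (min_patches : Int) (max_patches : Int) : Decidable (Pre_find_optimal_patch_and_size image_size depth min_patches max_patches) := by unfold Pre_find_optimal_patch_and_size; infer_instance

def pvWitness_find_optimal_patch_and_size : List Int × Int × Int × Int := ([224, 96], 2, 2, 5)

def Spec_find_optimal_patch_and_size (image_size : List Int) (depth : Int) (min_patches : Int) (max_patches : Int) (out : List (List (Option Int))) : Prop := out = find_optimal_patch_and_size_alt image_size depth min_patches max_patches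
instance (image_size : List Int) (depth : Int) (min_patches : Int) (max_patches : Int) (out : List (List (Option Int))) : Decidable (Spec_find_optimal_patch_and_size image_size depth min_patches max_patches out) := by unfold Spec_find_optimal_patch_and_size; infer_instance

-- ===== CLAIM (what is proved, stated in full; the proofs are below) =====
def Claim_equal_find_optimal_patch_and_size : Prop := ∀ (image_size : List Int) (depth : Int) (min_patches : Int) (max_patches : Int), Dom_find_optimal_patch_and_size image_size depth min_patches max_patches → Pre_find_optimal_patch_and_size image_size depth min_patches max_patches → Spec_find_optimal_patch_and_size image_size depth min_patches max_patches (find_optimal_patch_and_size image_size depth min_patches max_patches)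

-- ===== LEMMAS AND PROOFS =====

-- ceiling-division window and uniqueness
theorem pvCdiv_window {d p : Int} (hp : 0 < p) :
    (pvCdiv d p - 1) * p < d ∧ d ≤ pvCdiv d p * p :=
  (PySem.Int.neg_floordiv_neg_eq_iff_of_pos hp).mp rfl

theorem pvCdiv_eq {d p m : Int} (hp : 0 < p) (h1 : (m - 1) * p < d) (h2 : d ≤ m * p) :
    pvCdiv d p = m :=
  (PySem.Int.neg_floordiv_neg_eq_iff_of_pos hp).mpr ⟨h1, h2⟩

-- validity predicates / keys used to characterise the two sides
def pvOkA (d minP maxP ps : Int) : Prop := minP ≤ pvCdiv d ps ∧ pvCdiv d ps ≤ maxP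
def pvKeyA (d ps : Int) : Int := |d - ps * pvCdiv d ps|
def pvOkB (d b n : Int) : Prop := pvPs d b n ≤ d ∧ pvPs d b n * (n - 1) < d
def pvKeyB (d b n : Int) : Int := pvPs d b n * n - d

def pvGoodA (d minP maxP : Int) (C : Int → Prop)
    (st : Option Int × Option Int × Option Int × Option Int) : Prop :=
  (st = (none, none, none, none) ∧ ∀ q, C q → ¬ pvOkA d minP maxP q) ∨
  (∃ ps, C ps ∧ pvOkA d minP maxP ps ∧
    st = (some (pvKeyA d ps), some ps, some (ps * pvCdiv d ps), some (pvCdiv d ps)) ∧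
    ∀ q, C q → pvOkA d minP maxP q →
      pvKeyA d ps < pvKeyA d q ∨ (pvKeyA d ps = pvKeyA d q ∧ ps ≤ q))

theorem pvGoodA_congr {d minP maxP : Int} {C C' : Int → Prop} {st}
    (h : ∀ q, C q ↔ C' q) (hg : pvGoodA d minP maxP C st) : pvGoodA d minP maxP C' st := by
  rcases hg with ⟨h1, h2⟩ | ⟨ps, h1, h2, h3, h4⟩
  · exact Or.inl ⟨h1, fun q hq => h2 q ((h q).mpr hq)⟩
  · exact Or.inr ⟨ps, (h ps).mp h1, h2, h3, fun q hq => h4 q ((h q).mpr hq)⟩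

theorem pvStepA_good {d minP maxP : Int} {C : Int → Prop} {st} {x : Int}
    (hCx : ∀ q, C q → q < x) (h : pvGoodA d minP maxP C st) :
    pvGoodA d minP maxP (fun q => C q ∨ q = x) (pvStepA d minP maxP st x) := by
  unfold pvStepA
  by_cases hok : minP ≤ pvCdiv d x ∧ pvCdiv d x ≤ maxP
  · rcases h with ⟨h1, h2⟩ | ⟨ps, h1, h2, h3, h4⟩
    · subst h1
      simp only [hok]
      refine Or.inr ⟨x, Or.inr rfl, hok, rfl, ?_⟩
      rintro q (hq | rfl) hq2
      · exact absurd hq2 (h2 q hq)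
      · exact Or.inr ⟨rfl, le_refl _⟩
    · subst h3
      simp only [hok]
      by_cases hlt : |d - x * pvCdiv d x| < pvKeyA d ps
      · simp only [hlt]
        refine Or.inr ⟨x, Or.inr rfl, hok, rfl, ?_⟩
        rintro q (hq | rfl) hq2
        · rcases h4 q hq hq2 with h5 | ⟨h5, _⟩
          · exact Or.inl (lt_trans hlt h5)
          · exact Or.inl (h5 ▸ hlt)
        · exact Or.inr ⟨rfl, le_refl _⟩
      · simp only [hlt, if_false]
        refine Or.inr ⟨ps, Or.inl h1, h2, rfl, ?_⟩
        rintro q (hq | rfl) hq2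
        · exact h4 q hq hq2
        · rcases lt_or_eq_of_le (not_lt.mp hlt) with h5 | h5
          · exact Or.inl h5
          · exact Or.inr ⟨h5, le_of_lt (hCx ps h1)⟩
  · simp only [hok, if_false]
    rcases h with ⟨h1, h2⟩ | ⟨ps, h1, h2, h3, h4⟩
    · refine Or.inl ⟨h1, ?_⟩
      rintro q (hq | rfl) hq2
      · exact h2 q hq hq2
      · exact hok hq2
    · refine Or.inr ⟨ps, Or.inl h1, h2, h3, ?_⟩
      rintro q (hq | rfl) hq2
      · exact h4 q hq hq2
      · exact absurd hq2 hok

theorem pvFoldA_good (d minP maxP : Int) :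
    ∀ (L : List Int) (C : Int → Prop) st,
      (∀ x ∈ L, ∀ q, C q → q < x) → L.Pairwise (· < ·) → pvGoodA d minP maxP C st →
      pvGoodA d minP maxP (fun q => C q ∨ q ∈ L) (L.foldl (pvStepA d minP maxP) st) := by
  intro L
  induction L with
  | nil => intro C st _ _ h; exact pvGoodA_congr (by simp) h
  | cons x L ih =>
    intro C st hbefore hpw h
    have hpw' := (List.pairwise_cons.mp hpw)
    have h1 : pvGoodA d minP maxP (fun q => C q ∨ q = x) (pvStepA d minP maxP st x) :=
      pvStepA_good (fun q hq => hbefore x (by simp) q hq) h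
    have h2 := ih (fun q => C q ∨ q = x) (pvStepA d minP maxP st x)
      (by rintro y hy q (hq | rfl)
          · exact lt_trans (hbefore x (by simp) q hq) (hpw'.1 y hy)
          · exact hpw'.1 y hy)
      hpw'.2 h1
    refine pvGoodA_congr (fun q => ?_) h2
    simp only [List.mem_cons]
    tauto

theorem pvPairwise_pyRange_pos (a c : Int) {s : Int} (hs : 0 < s) :
    (PySem.List.pyRange a c s).Pairwise (· < ·) := by
  rw [PySem.List.pyRange_of_pos a c hs]
  refine List.Pairwise.map _ ?_ List.pairwise_lt_range
  intro k l hkl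
  have hkl' : (k : Int) < (l : Int) := by exact_mod_cast hkl
  nlinarith

-- pvPs is strictly antitone on valid patch counts
theorem pvPs_anti {d b n q : Int} (hb : 0 < b) (hq : 1 ≤ q) (hlt : q < n)
    (hn : pvOkB d b n) (hq2 : pvOkB d b q) : pvPs d b n < pvPs d b q := by
  obtain ⟨hn1, hn2⟩ := hn
  obtain ⟨hq1, hq2'⟩ := hq2
  have hn0 : 1 ≤ n := by omega
  have hw := (pvCdiv_window (d := d) (p := b * n) (mul_pos hb (by omega))).2
  have hdn : d ≤ pvPs d b n * n := by
    unfold pvPs; nlinarith [hw]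
  have hpos : 0 < pvPs d b n := by nlinarith
  by_contra hle
  push_neg at hle
  have hwq := (pvCdiv_window (d := d) (p := b * q) (mul_pos hb (by omega))).2
  have hdq : d ≤ pvPs d b q * q := by unfold pvPs; nlinarith [hwq]
  have hqpos : 0 < pvPs d b q := by nlinarith
  nlinarith

-- elementary facts about the lexicographic tuple order
theorem pvTupLt_irrefl (x : Int × Int × Int × Int) : pvTupLt x x = false := by
  obtain ⟨a, b, c, e⟩ := x
  simp [pvTupLt]

theorem pvTupLt_trans {x y z : Int × Int × Int × Int}
    (h1 : pvTupLt x y = true) (h2 : pvTupLt y z = true) : pvTupLt x z = true := by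
  obtain ⟨a1, b1, c1, e1⟩ := x
  obtain ⟨a2, b2, c2, e2⟩ := y
  obtain ⟨a3, b3, c3, e3⟩ := z
  simp only [pvTupLt, Bool.or_eq_true, Bool.and_eq_true, decide_eq_true_eq, beq_iff_eq] at *
  omega

theorem pvTupLt_cases {x z : Int × Int × Int × Int} (y : Int × Int × Int × Int)
    (h : pvTupLt x z = true) : pvTupLt x y = true ∨ pvTupLt y z = true := by
  obtain ⟨a1, b1, c1, e1⟩ := x
  obtain ⟨a2, b2, c2, e2⟩ := y
  obtain ⟨a3, b3, c3, e3⟩ := z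
  simp only [pvTupLt, Bool.or_eq_true, Bool.and_eq_true, decide_eq_true_eq, beq_iff_eq] at *
  omega

theorem pvTupLt_false_le {x y : Int × Int × Int × Int} (h : pvTupLt x y = false) :
    y.1 < x.1 ∨ (y.1 = x.1 ∧ (y.2.1 < x.2.1 ∨ y.2.1 = x.2.1)) := by
  obtain ⟨a1, b1, c1, e1⟩ := x
  obtain ⟨a2, b2, c2, e2⟩ := y
  simp only [pvTupLt, Bool.or_eq_false_iff, Bool.and_eq_false_iff, decide_eq_false_iff_not,
    beq_eq_false_iff_ne, ne_eq, not_lt] at h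
  simp only []
  omega

-- the min() fold returns a member that no element of the list is strictly below
theorem pvMinFold_spec (rest : List (Int × Int × Int × Int)) :
    ∀ c : Int × Int × Int × Int,
      (rest.foldl (fun m x => if pvTupLt x m then x else m) c ∈ c :: rest) ∧
      ∀ x ∈ c :: rest, pvTupLt x (rest.foldl (fun m x => if pvTupLt x m then x else m) c) = false := by
  induction rest with
  | nil =>
    intro c
    refine ⟨by simp, ?_⟩
    intro x hx
    rcases List.mem_cons.mp hx with rfl | h
    · exact pvTupLt_irrefl x
    · cases h
  | cons y rest ih =>
    intro c
    simp only [List.foldl_cons]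
    by_cases hyc : pvTupLt y c = true
    · rw [if_pos hyc]
      obtain ⟨hm, hmin⟩ := ih y
      refine ⟨List.mem_cons_of_mem _ hm, ?_⟩
      intro x hx
      rcases List.mem_cons.mp hx with rfl | hx'
      · cases hcm : pvTupLt x (rest.foldl (fun m x => if pvTupLt x m then x else m) y) with
        | false => rfl
        | true =>
          have hym := hmin y (List.mem_cons_self ..)
          rw [pvTupLt_trans hyc hcm] at hym
          cases hym
      · exact hmin x hx'
    · rw [if_neg hyc]
      obtain ⟨hm, hmin⟩ := ih c
      refine ⟨?_, ?_⟩
      · rcases List.mem_cons.mp hm with h | h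
        · rw [h]; exact List.mem_cons_self ..
        · exact List.mem_cons_of_mem _ (List.mem_cons_of_mem _ h)
      · intro x hx
        rcases List.mem_cons.mp hx with rfl | hx'
        · exact hmin x (List.mem_cons_self ..)
        · rcases List.mem_cons.mp hx' with rfl | hx''
          · cases hym : pvTupLt x (rest.foldl (fun m x => if pvTupLt x m then x else m) c) with
            | false => rfl
            | true =>
              rcases pvTupLt_cases c hym with h | h
              · exact absurd h hyc
              · have := hmin c (List.mem_cons_self ..)
                rw [h] at this; cases this
          · exact hmin x (List.mem_cons_of_mem _ hx'')
  
-- membership in the candidate list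
theorem pvCands_mem (d b minP maxP : Int) (x : Int × Int × Int × Int) :
    x ∈ pvCands d b minP maxP ↔
      b ≤ d ∧ ∃ n, (max minP 1 ≤ n ∧ n ≤ min maxP (pvCdiv d b)) ∧ pvOkB d b n ∧
        x = (pvKeyB d b n, -n, pvPs d b n, n) := by
  unfold pvCands
  split_ifs with hbd
  · simp only [List.mem_filterMap, PySem.List.mem_pyRange_one, hbd, true_and]
    constructor
    · rintro ⟨n, ⟨h1, h2⟩, hx⟩
      split_ifs at hx with hok
      exact ⟨n, ⟨h1, by omega⟩, hok, ((Option.some.injEq _ _).mp hx).symm⟩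
    · rintro ⟨n, ⟨h1, h2⟩, hok, rfl⟩
      refine ⟨n, ⟨h1, by omega⟩, ?_⟩
      rw [if_pos]
      · rfl
      · exact hok
  · simp [hbd]

-- characterisation of B's per-dimension result
def pvGoodB (d b minP maxP : Int) (st : Option Int × Option Int × Option Int) : Prop :=
  (st = (none, none, none) ∧
    ∀ q, (max minP 1 ≤ q ∧ q ≤ min maxP (pvCdiv d b)) → b ≤ d → ¬ pvOkB d b q) ∨
  (∃ n, (max minP 1 ≤ n ∧ n ≤ min maxP (pvCdiv d b)) ∧ pvOkB d b n ∧ b ≤ d ∧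
    st = (some (pvPs d b n), some (pvPs d b n * n), some n) ∧
    ∀ q, (max minP 1 ≤ q ∧ q ≤ min maxP (pvCdiv d b)) → pvOkB d b q →
      pvKeyB d b n < pvKeyB d b q ∨ (pvKeyB d b n = pvKeyB d b q ∧ pvPs d b n ≤ pvPs d b q))

theorem pvBestFor_good (d b minP maxP : Int) (hb : 0 < b) :
    pvGoodB d b minP maxP (pvBestFor d b minP maxP) := by
  unfold pvBestFor
  rcases hC : pvCands d b minP maxP with _ | ⟨c, rest⟩
  · refine Or.inl ⟨rfl, ?_⟩
    intro q hq hbd hok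
    have : (pvKeyB d b q, -q, pvPs d b q, q) ∈ pvCands d b minP maxP :=
      (pvCands_mem d b minP maxP _).mpr ⟨hbd, q, hq, hok, rfl⟩
    rw [hC] at this
    cases this
  · obtain ⟨hm, hmin⟩ := pvMinFold_spec rest c
    set m := rest.foldl (fun m x => if pvTupLt x m then x else m) c with hmdef
    have hmem : m ∈ pvCands d b minP maxP := by rw [hC]; exact hm
    obtain ⟨hbd, n, hw, hok, hmx⟩ := (pvCands_mem d b minP maxP m).mp hmem
    refine Or.inr ⟨n, hw, hok, hbd, ?_, ?_⟩
    · show (some m.2.2.1, some (m.2.2.1 * m.2.2.2), some m.2.2.2) =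
        (some (pvPs d b n), some (pvPs d b n * n), some n)
      rw [hmx]
    · intro q hq hokq
      have hqmem : (pvKeyB d b q, -q, pvPs d b q, q) ∈ pvCands d b minP maxP :=
        (pvCands_mem d b minP maxP _).mpr ⟨hbd, q, hq, hokq, rfl⟩
      rw [hC] at hqmem
      have hfalse := hmin _ hqmem
      have hle := pvTupLt_false_le hfalse
      rw [hmx] at hle
      simp only [] at hle
      by_cases hqn : q = n
      · subst hqn; exact Or.inr ⟨rfl, le_refl _⟩
      · rcases hle with h | ⟨h, h2⟩
        · exact Or.inl h
        · have hqlt : q < n := by omega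
          exact Or.inr ⟨h, le_of_lt (pvPs_anti hb (by omega) hqlt hok hokq)⟩

-- B candidate n gives the A candidate pvPs d b n with the same key
theorem pvB_to_A {d b n : Int} (hb : 0 < b) (hn : 1 ≤ n) (hok : pvOkB d b n) :
    pvCdiv d (pvPs d b n) = n ∧ pvPs d b n ∈ PySem.List.pyRange b (d + 1) b ∧
    pvKeyA d (pvPs d b n) = pvKeyB d b n := by
  obtain ⟨h1, h2⟩ := hok
  have hw := (pvCdiv_window (d := d) (p := b * n) (by positivity : (0:Int) < b * n)).2
  have hdn : d ≤ pvPs d b n * n := by unfold pvPs; nlinarith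
  have hpos : 0 < pvPs d b n := by nlinarith
  have hcd : pvCdiv d (pvPs d b n) = n := pvCdiv_eq hpos (by nlinarith) (by nlinarith)
  have hdvd : b ∣ pvPs d b n - b := by
    unfold pvPs
    exact ⟨pvCdiv d (b * n) - 1, by ring⟩
  have hcb : 1 ≤ pvCdiv d (b * n) := by
    by_contra hc
    push_neg at hc
    have : pvPs d b n ≤ 0 := by unfold pvPs; nlinarith
    omega
  refine ⟨hcd, ?_, ?_⟩
  · rw [PySem.List.mem_pyRange_iff_of_pos hb]
    refine ⟨?_, by omega, hdvd⟩
    unfold pvPs; nlinarith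
  · unfold pvKeyA pvKeyB
    rw [hcd, abs_of_nonpos (by omega)]
    ring

-- A candidate ps is lex-dominated by the B candidate n = pvCdiv d ps
theorem pvA_to_B {d b minP maxP ps : Int} (hb : 0 < b)
    (hmem : ps ∈ PySem.List.pyRange b (d + 1) b) (hok : pvOkA d minP maxP ps) :
    ∃ n, 1 ≤ n ∧ minP ≤ n ∧ n ≤ maxP ∧ n ≤ pvCdiv d b ∧ pvOkB d b n ∧ pvPs d b n ≤ ps ∧
      (pvKeyB d b n < pvKeyA d ps ∨ (pvKeyB d b n = pvKeyA d ps ∧ pvPs d b n ≤ ps)) := by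
  rw [PySem.List.mem_pyRange_iff_of_pos hb] at hmem
  obtain ⟨hb_ps, hps_d, hdvd⟩ := hmem
  have hps_d' : ps ≤ d := by omega
  have hps_pos : 0 < ps := by omega
  obtain ⟨hw1, hw2⟩ := pvCdiv_window (d := d) (p := ps) hps_pos
  set n := pvCdiv d ps with hn
  have hd1 : 1 ≤ d := by omega
  have hn1 : 1 ≤ n := by nlinarith
  obtain ⟨k, hk⟩ : b ∣ ps := by
    obtain ⟨j, hj⟩ := hdvd; exact ⟨j + 1, by linear_combination hj⟩
  have hk1 : 1 ≤ k := by nlinarith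
  have hbn : (0:Int) < b * n := by positivity
  obtain ⟨hv1, hv2⟩ := pvCdiv_window (d := d) (p := b * n) hbn
  have hc_le : pvCdiv d (b * n) ≤ k := by
    have hkd : d ≤ k * (b * n) := by nlinarith
    nlinarith
  have hps_le : pvPs d b n ≤ ps := by
    unfold pvPs; nlinarith
  have hokB : pvOkB d b n := by
    refine ⟨le_trans hps_le hps_d', ?_⟩
    calc pvPs d b n * (n - 1) ≤ ps * (n - 1) := by nlinarith
      _ < d := by nlinarith
  have hdn : d ≤ pvPs d b n * n := by unfold pvPs; nlinarith
  have hkeyA : pvKeyA d ps = ps * n - d := by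
    unfold pvKeyA
    rw [← hn, abs_of_nonpos (by nlinarith)]
    ring
  obtain ⟨hu1, hu2⟩ := pvCdiv_window (d := d) (p := b) hb
  have hm1 : 1 ≤ pvCdiv d b := by nlinarith
  have hnb : n ≤ pvCdiv d b := by nlinarith
  refine ⟨n, hn1, hok.1, hok.2, hnb, hokB, hps_le, ?_⟩
  rcases lt_or_eq_of_le hps_le with h | h
  · left; unfold pvKeyB; rw [hkeyA]; nlinarith
  · right
    constructor
    · unfold pvKeyB; rw [hkeyA, h]
    · exact hps_le

-- the per-dimension equivalence
theorem pvDim_eq (d b minP maxP : Int) (hb : 0 < b) :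
    pvBestFor d b minP maxP =
      ((pvDimA d b minP maxP).2.1, (pvDimA d b minP maxP).2.2.1, (pvDimA d b minP maxP).2.2.2) := by
  have hA := pvFoldA_good d minP maxP (PySem.List.pyRange b (d + 1) b) (fun _ => False)
    (none, none, none, none) (by simp) (pvPairwise_pyRange_pos _ _ hb)
    (Or.inl ⟨rfl, by simp⟩)
  rw [show (fun q => False ∨ q ∈ PySem.List.pyRange b (d+1) b) = (fun q => q ∈ PySem.List.pyRange b (d+1) b) from by funext q; simp] at hA
  have hB := pvBestFor_good d b minP maxP hb
  unfold pvDimA at *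
  rcases hA with ⟨hA1, hA2⟩ | ⟨ps, hA1, hA2, hA3, hA4⟩ <;>
    rcases hB with ⟨hB1, hB2⟩ | ⟨n, hw, hB2, hbd, hB3, hB4⟩
  · rw [hA1, hB1]
  · -- A empty, B found a candidate: contradiction via pvB_to_A
    exfalso
    have hn1 : 1 ≤ n := by omega
    obtain ⟨hcd, hmem, _⟩ := pvB_to_A hb hn1 hB2
    exact hA2 _ hmem ⟨by rw [hcd]; omega, by rw [hcd]; omega⟩
  · -- A found a candidate, B empty: contradiction via pvA_to_B
    exfalso
    have hbd : b ≤ d := by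
      have := hA1
      rw [PySem.List.mem_pyRange_iff_of_pos hb] at this
      omega
    obtain ⟨n, hn1, hn2, hn3, hnb, hokB, _, _⟩ := pvA_to_B hb hA1 hA2
    exact hB2 n (by omega) hbd hokB
  · -- both found: they are the lex-minimum of matching candidate sets, so equal
    have hn1 : 1 ≤ n := by omega
    obtain ⟨hcd, hmemA, hkey⟩ := pvB_to_A hb hn1 hB2
    have hokA' : pvOkA d minP maxP (pvPs d b n) := ⟨by rw [hcd]; omega, by rw [hcd]; omega⟩
    obtain ⟨n', hn'1, hn'2, hn'3, hn'b, hokB', hle', hdom'⟩ := pvA_to_B hb hA1 hA2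
    have hB4' := hB4 n' (by omega) hokB'
    have hA4' := hA4 (pvPs d b n) hmemA hokA'
    have heq_ps : ps = pvPs d b n := by
      rcases hA4' with h | ⟨h, h2⟩ <;> rcases hB4' with h' | ⟨h', h2'⟩ <;>
        rcases hdom' with h'' | ⟨h'', h2''⟩ <;>
        · rw [hkey] at * ; omega
    rw [hA3, hB3]
    subst heq_ps
    rw [hcd]

-- A's fold with list appends written as three maps
theorem pvFoldA_maps (b minP maxP : Int) :
    ∀ (L : List Int) (acc : List (Option Int) × List (Option Int) × List (Option Int)),
      L.foldl
        (fun (acc : List (Option Int) × List (Option Int) × List (Option Int)) d =>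
          let res := pvDimA d b minP maxP
          (acc.1 ++ [res.2.1], acc.2.1 ++ [res.2.2.1], acc.2.2 ++ [res.2.2.2])) acc =
      (acc.1 ++ L.map (fun d => (pvDimA d b minP maxP).2.1),
       acc.2.1 ++ L.map (fun d => (pvDimA d b minP maxP).2.2.1),
       acc.2.2 ++ L.map (fun d => (pvDimA d b minP maxP).2.2.2)) := by
  intro L
  induction L with
  | nil => intro acc; simp
  | cons d rest ih =>
    intro acc
    rw [List.foldl_cons, ih]
    simp [List.append_assoc]

-- ===== VERDICT (by name: the statement is the Claim_ definition above) =====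
theorem find_optimal_patch_and_size_spec : Claim_equal_find_optimal_patch_and_size := by
  intro image_size depth minP maxP _ _
  unfold Spec_find_optimal_patch_and_size
  unfold find_optimal_patch_and_size find_optimal_patch_and_size_alt
  have hb : (0:Int) < 2 ^ depth.toNat := by positivity
  have e : ∀ d : Int, pvBestFor d (2 ^ depth.toNat) minP maxP =
      ((pvDimA d (2 ^ depth.toNat) minP maxP).2.1,
       (pvDimA d (2 ^ depth.toNat) minP maxP).2.2.1,
       (pvDimA d (2 ^ depth.toNat) minP maxP).2.2.2) :=
    fun d => pvDim_eq d _ minP maxP hb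
  simp only [pvFoldA_maps, List.nil_append, List.map_map, Function.comp_def, e]
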